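-- pv_equiv track=rewrite | github.com/lan17/alg_cmp | GCJ/2019/qualification/A.py | subtract_1
-- ===== SOURCE A (Python) =====
-- def subtract_1(x):
--     ret = 0
--     while x > 0:
--         c = x % 10
--         if c == 4:
--             c -= 1
--         ret += c
--         ret *= 10
--         x = x // 10
--     return ret
-- ===== SOURCE B (Python) =====
-- def _rev3(x):
--     # returns (digits of x reversed with 4->3 as a number, 10**(digit count of x))
--     if x <= 0:
--         return (0, 1)
--     hi, p = _rev3(x // 10)
--     d = x % 10
--     return (hi + (3 if d == 4 else d) * p, 10 * p)
--
--
-- def subtract_1(x):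
--     return 10 * _rev3(x)[0]
-- ===== Notes on version B (the rewrite author's own statement) =====
-- stated objective: alternative
-- what changed: Replaced the iterative Horner-style accumulator loop (shift the accumulator up one decimal place after each digit) by a recursion on the truncated number that returns the reversed number together with the current power of ten, combining digits most-significant-first and appending the trailing zero once at the end.
import Mathlib
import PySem

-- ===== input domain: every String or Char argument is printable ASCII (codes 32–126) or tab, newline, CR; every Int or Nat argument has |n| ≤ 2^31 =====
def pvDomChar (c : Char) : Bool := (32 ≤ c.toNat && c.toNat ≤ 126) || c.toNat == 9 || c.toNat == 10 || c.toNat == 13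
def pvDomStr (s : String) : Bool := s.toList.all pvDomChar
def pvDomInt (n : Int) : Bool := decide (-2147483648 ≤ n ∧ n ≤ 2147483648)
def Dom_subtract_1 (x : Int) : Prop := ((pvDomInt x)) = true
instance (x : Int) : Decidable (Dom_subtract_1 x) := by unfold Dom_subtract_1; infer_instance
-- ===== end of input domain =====

-- B replaces A's Horner-style accumulator loop by a recursion on x // 10 that
-- returns (reversed number with 4->3, power of ten), an alternative decomposition
-- of the same O(digits) cost.

theorem pvFloordivTen_toNat_lt (x : Int) (h : 0 < x) :
    (PySem.Int.floordiv x 10).toNat < x.toNat := by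
  have : PySem.Int.floordiv x 10 = x / 10 := by
    simp [PySem.Int.floordiv, Int.fdiv_eq_ediv_of_nonneg x (by norm_num : (0:Int) ≤ 10)]
  rw [this]
  omega

-- ===== PORT A =====
def subtract1LoopA (x ret : Int) : Int :=
  if _h : x > 0 then
    let c := PySem.Int.mod x 10
    let c := if c == 4 then c - 1 else c
    subtract1LoopA (PySem.Int.floordiv x 10) ((ret + c) * 10)
  else ret
termination_by x.toNat
decreasing_by exact pvFloordivTen_toNat_lt x _h

def subtract_1 (x : Int) : Int := subtract1LoopA x 0

-- ===== PORT B =====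
def subtract1Rev3 (x : Int) : Int × Int :=
  if _h : x ≤ 0 then (0, 1)
  else
    let hp := subtract1Rev3 (PySem.Int.floordiv x 10)
    let d := PySem.Int.mod x 10
    (hp.1 + (if d == 4 then 3 else d) * hp.2, 10 * hp.2)
termination_by x.toNat
decreasing_by exact pvFloordivTen_toNat_lt x (by omega)

def subtract_1_alt (x : Int) : Int := 10 * (subtract1Rev3 x).1

-- ===== PRECONDITION & SPEC =====
def Spec_subtract_1 (x : Int) (out : Int) : Prop := out = subtract_1_alt x
instance (x : Int) (out : Int) : Decidable (Spec_subtract_1 x out) := by unfold Spec_subtract_1; infer_instance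

-- ===== CLAIM (what is proved, stated in full; the proofs are below) =====
def Claim_equal_subtract_1 : Prop := ∀ (x : Int), Dom_subtract_1 x → Spec_subtract_1 x (subtract_1 x)

-- ===== LEMMAS AND PROOFS =====
theorem subtract1_loop_inv (n : Nat) :
    ∀ (x ret : Int), x.toNat = n →
      subtract1LoopA x ret = ret * (subtract1Rev3 x).2 + (subtract1Rev3 x).1 * 10 := by
  induction n using Nat.strong_induction_on with
  | _ n ih =>
    intro x ret hn
    by_cases hx : x > 0
    · rw [subtract1LoopA, subtract1Rev3]
      simp only [hx, dif_pos, dif_neg (by omega : ¬ x ≤ 0)]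
      have hrec := ih (PySem.Int.floordiv x 10).toNat
        (hn ▸ pvFloordivTen_toNat_lt x hx) (PySem.Int.floordiv x 10)
        ((ret + if PySem.Int.mod x 10 == 4 then PySem.Int.mod x 10 - 1 else PySem.Int.mod x 10) * 10)
        rfl
      rw [hrec]
      by_cases hd : PySem.Int.mod x 10 = 4
      · simp only [hd]
        norm_num
        ring
      · simp only [beq_iff_eq, if_neg hd]
        ring
    · rw [subtract1LoopA, subtract1Rev3]
      simp only [dif_neg hx, dif_pos (by omega : x ≤ 0)]
      ring

-- ===== VERDICT (by name: the statement is the Claim_ definition above) =====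
theorem subtract_1_spec : Claim_equal_subtract_1 := by
  intro x _
  unfold Spec_subtract_1 subtract_1 subtract_1_alt
  rw [subtract1_loop_inv x.toNat x 0 rfl]
  ring
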